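-- pv_equiv track=rewrite | github.com/ntnprdhmm/codechef | beginner/chefarrp.py | calc_answ
-- ===== SOURCE A (Python) =====
-- def calc_answ(n, a):
--     c = 0
--     # go throught array
--     for i in range(n):
--         # foreach subarray starting at index i, check if the sum and product are equals
--         s = 0
--         p = 1
--         for j in range(i, n):
--             s = s + a[j]
--             p = p * a[j]
--
--             if s == p:
--                 c = c + 1
--     return c
-- ===== SOURCE B (Python) =====
-- def _prod(xs):
--     p = 1
--     for x in xs:
--         p *= x
--     return p
--
--
-- def calc_answ(n, a):
--     # count (i, j) pairs whose subarray a[i:j+1] has equal sum and product,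
--     # recomputing both from the slice instead of carrying accumulators
--     return sum(1 for i in range(n) for j in range(i, n)
--                if sum(a[i:j + 1]) == _prod(a[i:j + 1]))
-- ===== Notes on version B (the rewrite author's own statement) =====
-- stated objective: idiomatic
-- what changed: Replaces the hand-rolled running sum/product accumulators with a single counting generator expression that recomputes sum and product from the slice a[i:j+1] for each pair, so no loop-carried state remains.
import Mathlib
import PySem

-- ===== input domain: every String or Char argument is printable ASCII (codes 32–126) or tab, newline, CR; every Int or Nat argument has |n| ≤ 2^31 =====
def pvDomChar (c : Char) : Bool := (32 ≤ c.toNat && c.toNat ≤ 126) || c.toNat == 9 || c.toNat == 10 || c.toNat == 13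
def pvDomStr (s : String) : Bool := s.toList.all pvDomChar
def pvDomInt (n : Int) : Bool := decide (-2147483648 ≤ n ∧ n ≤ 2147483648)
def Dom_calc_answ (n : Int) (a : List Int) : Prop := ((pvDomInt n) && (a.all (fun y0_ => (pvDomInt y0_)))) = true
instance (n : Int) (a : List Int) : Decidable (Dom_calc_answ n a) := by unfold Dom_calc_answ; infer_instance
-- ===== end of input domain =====

-- B drops A's running sum/product accumulators and counts pairs whose slice a[i:j+1]
-- has equal sum and product (same O(n^2) pair loop, slices rescanned; not faster).

-- ===== PORT A =====
-- a[j] is ported as pyGetD with default 0; Pre_ guarantees 0 ≤ j < a.length, so the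
-- default is never taken on admitted inputs (Python raises IndexError outside Pre_).
def calc_answ (n : Int) (a : List Int) : Int :=
  (PySem.List.pyRange 0 n 1).foldl (fun c i =>
    ((PySem.List.pyRange i n 1).foldl
      (fun (st : Int × Int × Int) j =>
        let x := PySem.List.pyGetD a j 0
        let s := st.1 + x
        let p := st.2.1 * x
        (s, p, if s = p then st.2.2 + 1 else st.2.2))
      (0, 1, c)).2.2) 0

-- ===== PORT B =====
-- helper _prod from Source B
def pvProd (xs : List Int) : Int := xs.foldl (fun p x => p * x) 1

def calc_answ_alt (n : Int) (a : List Int) : Int :=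
  (PySem.List.pyRange 0 n 1).foldl (fun c i =>
    (PySem.List.pyRange i n 1).foldl (fun c j =>
      if (PySem.List.slice a (some i) (some (j + 1))).sum
           = pvProd (PySem.List.slice a (some i) (some (j + 1))) then c + 1 else c) c) 0

-- ===== PRECONDITION & SPEC =====
-- Pre_ excludes exactly the inputs where Python A raises IndexError: n > len(a).
def Pre_calc_answ (n : Int) (a : List Int) : Prop := n ≤ (a.length : Int)
instance (n : Int) (a : List Int) : Decidable (Pre_calc_answ n a) := by unfold Pre_calc_answ; infer_instance
def pvWitness_calc_answ : Int × List Int := (3, [1, 2, 3])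

def Spec_calc_answ (n : Int) (a : List Int) (out : Int) : Prop := out = calc_answ_alt n a
instance (n : Int) (a : List Int) (out : Int) : Decidable (Spec_calc_answ n a out) := by unfold Spec_calc_answ; infer_instance

-- ===== CLAIM (what is proved, stated in full; the proofs are below) =====
def Claim_equal_calc_answ : Prop := ∀ (n : Int) (a : List Int), Dom_calc_answ n a → Pre_calc_answ n a → Spec_calc_answ n a (calc_answ n a)

-- ===== LEMMAS AND PROOFS =====

-- extending a slice by one element on the right
lemma slice_snoc (a : List Int) (i k : Int) (hi : 0 ≤ i) (hik : i ≤ k)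
    (hk : k < (a.length : Int)) :
    PySem.List.slice a (some i) (some (k + 1))
      = PySem.List.slice a (some i) (some k) ++ [a[k.toNat]'(by omega)] := by
  rw [PySem.List.slice_toNat a hi (by omega), PySem.List.slice_toNat a hi (by omega)]
  have h1 : (k + 1).toNat = k.toNat + 1 := by omega
  have h2 : k.toNat + 1 - i.toNat = (k.toNat - i.toNat) + 1 := by omega
  rw [h1, h2, List.take_add_one]
  congr 1
  rw [List.getElem?_drop]
  have h3 : i.toNat + (k.toNat - i.toNat) = k.toNat := by omega
  rw [h3, List.getElem?_eq_getElem (by omega)]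
  rfl

lemma pvProd_snoc (xs : List Int) (x : Int) : pvProd (xs ++ [x]) = pvProd xs * x := by
  simp [pvProd, List.foldl_append]

-- inner-loop invariant: A's accumulators equal sum/product of the slice processed so far
lemma inner_loop (a : List Int) (i n : Int) (hn : n ≤ (a.length : Int)) (hi : 0 ≤ i) :
    ∀ (m : Nat) (k c : Int), i ≤ k → (n - k).toNat = m →
    ((PySem.List.pyRange k n 1).foldl
        (fun (st : Int × Int × Int) j =>
          let x := PySem.List.pyGetD a j 0
          let s := st.1 + x
          let p := st.2.1 * x
          (s, p, if s = p then st.2.2 + 1 else st.2.2))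
        ((PySem.List.slice a (some i) (some k)).sum,
          pvProd (PySem.List.slice a (some i) (some k)), c)).2.2
      = (PySem.List.pyRange k n 1).foldl (fun c j =>
          if (PySem.List.slice a (some i) (some (j + 1))).sum
               = pvProd (PySem.List.slice a (some i) (some (j + 1))) then c + 1 else c) c := by
  intro m
  induction m with
  | zero =>
      intro k c hik hm
      rw [PySem.List.pyRange_one_eq_nil (by omega)]
      simp
  | succ m ih =>
      intro k c hik hm
      rw [PySem.List.pyRange_one_cons (by omega)]
      simp only [List.foldl_cons]
      have hx : PySem.List.pyGetD a k 0 = a[k.toNat]'(by omega) :=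
        PySem.List.pyGetD_eq_getElem (xs := a) (i := k) (d := 0) (by omega) (by omega)
      have hs : PySem.List.slice a (some i) (some (k + 1))
          = PySem.List.slice a (some i) (some k) ++ [a[k.toNat]'(by omega)] :=
        slice_snoc a i k hi hik (by omega)
      have hsum : (PySem.List.slice a (some i) (some k)).sum + a[k.toNat]'(by omega)
          = (PySem.List.slice a (some i) (some (k + 1))).sum := by
        rw [hs]; simp
      have hprod : pvProd (PySem.List.slice a (some i) (some k)) * a[k.toNat]'(by omega)
          = pvProd (PySem.List.slice a (some i) (some (k + 1))) := by
        rw [hs, pvProd_snoc]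
      rw [hx]
      simp only [hsum, hprod]
      exact ih (k + 1) _ (by omega) (by omega)

-- at k = i the slice is empty, so A's initial (0, 1) is the slice's sum/product
lemma slice_self (a : List Int) (i : Int) (hi : 0 ≤ i) :
    PySem.List.slice a (some i) (some i) = [] := by
  rw [PySem.List.slice_toNat a hi hi]
  simp

-- ===== VERDICT (by name: the statement is the Claim_ definition above) =====
theorem calc_answ_spec : Claim_equal_calc_answ := by
  intro n a _ hpre
  unfold Spec_calc_answ calc_answ calc_answ_alt
  refine PySem.List.foldl_congr_mem _ _ _ _ ?_
  intro c i hi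
  have h0i : 0 ≤ i := ((PySem.List.mem_pyRange_one).1 hi).1
  have := inner_loop a i n hpre h0i (n - i).toNat i c le_rfl rfl
  rw [slice_self a i h0i] at this
  simpa [pvProd] using this
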